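-- pv_equiv track=rewrite | github.com/fouad-tech/MBR-Alignment | MBR_Code/preferenceSetKD.py | CPS
-- ===== SOURCE A (Python) =====
-- def CPS(hypsRanked,trg,src):
--   samples = []
--   for i in range(0,len(hypsRanked),2):
--     if i+2 >= len(hypsRanked):
--       break
--     pair = ((src,trg,hypsRanked[i],hypsRanked[i+2]))
--     samples.append(pair)
--
--   return samples
-- ===== SOURCE B (Python) =====
-- def CPS(hypsRanked, trg, src):
--     evens = hypsRanked[::2]
--     return [(src, trg, a, b) for a, b in zip(evens, evens[1:])]
-- ===== Notes on version B (the rewrite author's own statement) =====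
-- stated objective: idiomatic
-- what changed: Replaces the manual step-by-2 index loop with break and i+2 lookahead by materializing the even-indexed sublist with a slice and zipping it with its own tail to form the adjacent pairs.
import Mathlib
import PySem

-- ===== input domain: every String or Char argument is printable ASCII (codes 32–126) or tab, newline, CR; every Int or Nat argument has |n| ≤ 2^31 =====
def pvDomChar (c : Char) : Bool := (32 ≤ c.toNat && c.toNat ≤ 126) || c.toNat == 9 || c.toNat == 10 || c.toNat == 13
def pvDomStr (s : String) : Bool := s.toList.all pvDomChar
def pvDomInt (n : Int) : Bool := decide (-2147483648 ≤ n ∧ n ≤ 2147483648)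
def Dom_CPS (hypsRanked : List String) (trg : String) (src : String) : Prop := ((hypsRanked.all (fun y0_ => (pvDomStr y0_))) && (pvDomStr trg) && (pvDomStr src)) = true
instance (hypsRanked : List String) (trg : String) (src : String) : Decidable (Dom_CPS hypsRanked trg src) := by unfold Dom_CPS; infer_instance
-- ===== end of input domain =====

-- B replaces A's manual step-by-2 index loop (with break and i+2 lookahead) by "slice the
-- even-indexed sublist, then zip it with its tail" — a more idiomatic decomposition, same cost.

-- ===== PORT A =====
-- 'for i in range(0, len(hypsRanked), 2): if i+2 >= len: break; samples.append(...)'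
-- as index recursion stepping by 2 over the same accumulator `samples`;
-- hypsRanked[i] / hypsRanked[i+2] via pyGetD (the guard i+2 < len keeps both indices in range,
-- so the default "" is never used — exact on all inputs).
def CPS_go (hypsRanked : List String) (trg src : String) (i : Nat)
    (samples : List (String × String × String × String)) : List (String × String × String × String) :=
  if i < hypsRanked.length then
    if hypsRanked.length ≤ i + 2 then samples
    else CPS_go hypsRanked trg src (i + 2)
      (samples ++ [(src, trg, PySem.List.pyGetD hypsRanked (i : Int) "",
                              PySem.List.pyGetD hypsRanked ((i : Int) + 2) "")])
  else samples
termination_by hypsRanked.length - i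

def CPS (hypsRanked : List String) (trg : String) (src : String) : List (String × String × String × String) :=
  CPS_go hypsRanked trg src 0 []

-- ===== PORT B =====
-- evens = hypsRanked[::2]; [(src, trg, a, b) for a, b in zip(evens, evens[1:])]
def CPS_alt (hypsRanked : List String) (trg : String) (src : String) : List (String × String × String × String) :=
  let evens := (PySem.List.slice? hypsRanked none none 2).getD []
  (evens.zip (PySem.List.slice evens (some 1) none)).map (fun p => (src, trg, p.1, p.2))

-- ===== PRECONDITION & SPEC =====
def Spec_CPS (hypsRanked : List String) (trg : String) (src : String) (out : List (String × String × String × String)) : Prop := out = CPS_alt hypsRanked trg src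
instance (hypsRanked : List String) (trg : String) (src : String) (out : List (String × String × String × String)) : Decidable (Spec_CPS hypsRanked trg src out) := by unfold Spec_CPS; infer_instance

-- ===== CLAIM (what is proved, stated in full; the proofs are below) =====
def Claim_equal_CPS : Prop := ∀ (hypsRanked : List String) (trg : String) (src : String), Dom_CPS hypsRanked trg src → Spec_CPS hypsRanked trg src (CPS hypsRanked trg src)

-- ===== LEMMAS AND PROOFS =====

-- the even-indexed sublist, structurally
def pvEvens {α : Type} : List α → List α
  | [] => []
  | [a] => [a]
  | a :: _ :: r => a :: pvEvens r

lemma pv_filterMap_evens {α : Type} (l : List α) :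
    List.filterMap (fun k => l[2 * k]?) (List.range ((l.length + 1) / 2)) = pvEvens l := by
  induction l using pvEvens.induct with
  | case1 => simp [pvEvens]
  | case2 a => simp [pvEvens, List.range_one]
  | case3 a b r ih =>
    have hn : ((a :: b :: r).length + 1) / 2 = (r.length + 1) / 2 + 1 := by simp; omega
    rw [hn, List.range_succ_eq_map]
    have hstep : ∀ k : Nat, (a :: b :: r)[2 * (k + 1)]? = r[2 * k]? := by
      intro k
      rw [show 2 * (k + 1) = (2 * k) + 1 + 1 by ring]
      simp
    simp only [List.filterMap_cons, List.filterMap_map, Function.comp_def, hstep]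
    simp [pvEvens, ih]

lemma pv_slice2_eq {α : Type} (l : List α) :
    PySem.List.slice? l none none 2 = some (pvEvens l) := by
  have h : PySem.List.sliceIndices l.length none none 2 = ((0 : Int), (l.length : Int), 2) := by
    simp [PySem.List.sliceIndices]
  simp only [PySem.List.slice?, h]
  norm_num
  rw [← pv_filterMap_evens l]
  congr 2
  split <;> omega

def pvPairs (hypsRanked : List String) (trg src : String) : List (String × String × String × String) :=
  ((pvEvens hypsRanked).zip (pvEvens hypsRanked).tail).map (fun p => (src, trg, p.1, p.2))

lemma pv_alt_eq (hypsRanked : List String) (trg src : String) :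
    CPS_alt hypsRanked trg src = pvPairs hypsRanked trg src := by
  simp [CPS_alt, pv_slice2_eq, PySem.List.slice_from_one, pvPairs]

lemma pv_go_acc (l : List String) (t s : String) (i : Nat)
    (acc : List (String × String × String × String)) :
    CPS_go l t s i acc = acc ++ CPS_go l t s i [] := by
  suffices H : ∀ n i acc, l.length - i ≤ n →
      CPS_go l t s i acc = acc ++ CPS_go l t s i [] from H _ i acc le_rfl
  intro n
  induction n with
  | zero =>
    intro i acc h
    unfold CPS_go
    rw [if_neg (by omega), if_neg (by omega)]
    simp
  | succ n ih =>
    intro i acc h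
    unfold CPS_go
    split_ifs with h1 h2
    · simp
    · rw [ih (i + 2) _ (by omega), ih (i + 2) ([] ++ _) (by omega)]
      simp
    · simp

lemma pv_go_shift (a b : String) (r : List String) (t s : String) (i : Nat)
    (acc : List (String × String × String × String)) :
    CPS_go (a :: b :: r) t s (i + 2) acc = CPS_go r t s i acc := by
  suffices H : ∀ n i acc, r.length - i ≤ n →
      CPS_go (a :: b :: r) t s (i + 2) acc = CPS_go r t s i acc from H _ i acc le_rfl
  intro n
  induction n with
  | zero =>
    intro i acc h
    unfold CPS_go
    rw [if_neg (show ¬(i + 2 < (a :: b :: r).length) by simp only [List.length_cons]; omega),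
        if_neg (show ¬(i < r.length) by omega)]
  | succ n ih =>
    intro i acc h
    by_cases h1 : i < r.length
    · by_cases h2 : r.length ≤ i + 2
      · unfold CPS_go
        rw [if_pos (show i + 2 < (a :: b :: r).length by simp only [List.length_cons]; omega),
            if_pos (show (a :: b :: r).length ≤ i + 2 + 2 by simp only [List.length_cons]; omega),
            if_pos h1, if_pos h2]
      · unfold CPS_go
        rw [if_pos (show i + 2 < (a :: b :: r).length by simp only [List.length_cons]; omega),
            if_neg (show ¬((a :: b :: r).length ≤ i + 2 + 2) by simp only [List.length_cons]; omega),
            if_pos h1, if_neg h2]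
        have e1 : PySem.List.pyGetD (a :: b :: r) ((↑(i + 2) : Int)) "" = PySem.List.pyGetD r (↑i) "" := by
          simp only [PySem.List.pyGetD_natCast]
          rw [show i + 2 = (i + 1) + 1 from by omega]
          simp
        have e2 : PySem.List.pyGetD (a :: b :: r) ((↑(i + 2) : Int) + 2) "" = PySem.List.pyGetD r ((↑i : Int) + 2) "" := by
          rw [show ((↑(i + 2) : Int) + 2) = ((↑(i + 4) : Int)) from by push_cast; ring,
              show ((↑i : Int) + 2) = ((↑(i + 2) : Int)) from by push_cast; ring]
          simp only [PySem.List.pyGetD_natCast]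
          rw [show i + 4 = ((i + 2) + 1) + 1 from by omega]
          simp
        rw [e1, e2]
        exact ih (i + 2) _ (by omega)
    · unfold CPS_go
      rw [if_neg (show ¬(i + 2 < (a :: b :: r).length) by simp only [List.length_cons]; omega),
          if_neg h1]

lemma pvEvens_cons_head (c : String) (r' : List String) :
    pvEvens (c :: r') = c :: (pvEvens (c :: r')).tail := by
  cases r' <;> simp [pvEvens]

lemma pv_main (l : List String) (t s : String) : CPS l t s = pvPairs l t s := by
  induction l using pvEvens.induct with
  | case1 => simp [CPS, CPS_go, pvPairs, pvEvens]
  | case2 a =>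
    unfold CPS CPS_go
    rw [if_pos (by simp), if_pos (by simp)]
    simp [pvPairs, pvEvens]
  | case3 a b r ih =>
    cases r with
    | nil =>
      unfold CPS CPS_go
      rw [if_pos (by simp), if_pos (by simp)]
      simp [pvPairs, pvEvens]
    | cons c r' =>
      unfold CPS CPS_go
      rw [if_pos (show 0 < (a :: b :: c :: r').length by simp),
          if_neg (show ¬((a :: b :: c :: r').length ≤ 0 + 2) by simp only [List.length_cons]; omega)]
      have e1 : PySem.List.pyGetD (a :: b :: c :: r') ((↑(0 : Nat) : Int)) "" = a := by
        simp only [PySem.List.pyGetD_natCast]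
        simp [List.getD]
      have e2 : PySem.List.pyGetD (a :: b :: c :: r') ((↑(0 : Nat) : Int) + 2) "" = c := by
        rw [show ((↑(0 : Nat) : Int) + 2) = ((↑(2 : Nat) : Int)) from by norm_num]
        simp only [PySem.List.pyGetD_natCast]
        simp [List.getD]
      rw [e1, e2, pv_go_acc, pv_go_shift]
      have ihc : CPS_go (c :: r') t s 0 [] = pvPairs (c :: r') t s := ih
      rw [ihc]
      unfold pvPairs
      obtain ⟨T, hT⟩ : ∃ T, pvEvens (c :: r') = c :: T := ⟨_, pvEvens_cons_head c r'⟩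
      rw [show pvEvens (a :: b :: c :: r') = a :: pvEvens (c :: r') from by simp [pvEvens], hT]
      simp

-- ===== VERDICT (by name: the statement is the Claim_ definition above) =====
theorem CPS_spec : Claim_equal_CPS := by
  intro hypsRanked trg src _
  unfold Spec_CPS
  rw [pv_main, pv_alt_eq]
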